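-- pv_equiv track=rewrite | github.com/ifsvivek/Symbiote | main.py | _extract_code_targets
-- ===== SOURCE A (Python) =====
-- from typing import Optional, List, Dict, Any, Union
--
-- def _extract_code_targets(query: str) -> List[str]:
--     """Extract potential function names, file names from user query."""
--     # Simple extraction - look for common patterns
--     words = query.split()
--     targets = []
--
--     for word in words:
--         # Remove common punctuation
--         clean_word = word.strip('.,!?()[]{}":;')
--
--         # Look for function-like patterns
--         if clean_word.endswith("()") or "function" in query.lower():
--             targets.append(clean_word.replace("()", ""))
--         # Look for file patterns
--         elif "." in clean_word and any(
--             ext in clean_word for ext in [".py", ".js", ".ts", ".java"]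
--         ):
--             targets.append(clean_word)
--         # Look for CamelCase or snake_case identifiers
--         elif len(clean_word) > 3 and (
--             "_" in clean_word or any(c.isupper() for c in clean_word[1:])
--         ):
--             targets.append(clean_word)
--
--     return targets[:3]  # Limit to first 3 targets
-- ===== SOURCE B (Python) =====
-- from typing import List, Optional
--
-- _PUNCT = '.,!?()[]{}":;'
-- _EXTS = (".py", ".js", ".ts", ".java")
--
--
-- def _classify(word: str, func_mode: bool) -> Optional[str]:
--     """Return the target this word contributes, or None."""
--     clean = word.strip(_PUNCT)
--     if func_mode or clean.endswith("()"):
--         return clean.replace("()", "")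
--     if "." in clean and any(e in clean for e in _EXTS):
--         return clean
--     if len(clean) > 3 and ("_" in clean or any(c.isupper() for c in clean[1:])):
--         return clean
--     return None
--
--
-- def _extract_code_targets(query: str) -> List[str]:
--     """Extract potential function names, file names from user query."""
--     func_mode = "function" in query.lower()
--
--     def go(words: List[str], k: int) -> List[str]:
--         # collect at most k targets, stopping early once k are found
--         if k == 0 or not words:
--             return []
--         t = _classify(words[0], func_mode)
--         if t is None:
--             return go(words[1:], k)
--         return [t] + go(words[1:], k - 1)
--
--     return go(query.split(), 3)
-- ===== Notes on version B (the rewrite author's own statement) =====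
-- stated objective: alternative
-- what changed: B replaces the accumulate-everything-then-slice loop by an Optional-returning per-word classifier consumed by an early-terminating recursion carrying a remaining-count, so it stops classifying words as soon as three targets are found and never builds the full target list.
import Mathlib
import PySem

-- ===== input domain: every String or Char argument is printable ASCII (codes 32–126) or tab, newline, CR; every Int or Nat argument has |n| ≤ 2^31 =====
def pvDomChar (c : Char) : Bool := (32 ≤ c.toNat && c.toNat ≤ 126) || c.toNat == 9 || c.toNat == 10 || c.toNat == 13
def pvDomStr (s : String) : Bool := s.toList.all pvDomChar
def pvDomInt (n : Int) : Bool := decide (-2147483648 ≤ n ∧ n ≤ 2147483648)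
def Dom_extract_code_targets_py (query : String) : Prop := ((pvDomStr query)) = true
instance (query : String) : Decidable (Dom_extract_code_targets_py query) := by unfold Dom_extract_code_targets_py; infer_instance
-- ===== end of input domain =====

-- B replaces the accumulate-then-slice loop by an Optional-returning per-word classifier
-- consumed by an early-terminating recursion with a remaining-count (alternative decomposition, not faster).

-- ===== PORT A =====
def extract_code_targets_py (query : String) : List String :=
  let words := PySem.Str.split₀ query
  let targets := words.foldl (fun targets word =>
    let clean_word := PySem.Str.stripChars word ".,!?()[]{}\":;"
    if PySem.Str.endswith clean_word "()" || PySem.Str.isIn "function" (PySem.Str.lower query) then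
      targets ++ [PySem.Str.replace clean_word "()" ""]
    else if PySem.Str.isIn "." clean_word &&
        ([".py", ".js", ".ts", ".java"].any (fun ext => PySem.Str.isIn ext clean_word)) then
      targets ++ [clean_word]
    else if decide (3 < PySem.Str.len clean_word) &&
        (PySem.Str.isIn "_" clean_word ||
          (PySem.Str.slice clean_word (some 1) none).toList.any PySem.Chars.isupper) then
      targets ++ [clean_word]
    else targets) []
  PySem.List.slice targets none (some 3)

-- ===== PORT B =====
-- per-word classifier: the target this word contributes, or none
def pvClassify (word : String) (func_mode : Bool) : Option String :=
  let clean := PySem.Str.stripChars word ".,!?()[]{}\":;"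
  if func_mode || PySem.Str.endswith clean "()" then
    some (PySem.Str.replace clean "()" "")
  else if PySem.Str.isIn "." clean &&
      ([".py", ".js", ".ts", ".java"].any (fun ext => PySem.Str.isIn ext clean)) then
    some clean
  else if decide (3 < PySem.Str.len clean) &&
      (PySem.Str.isIn "_" clean ||
        (PySem.Str.slice clean (some 1) none).toList.any PySem.Chars.isupper) then
    some clean
  else none

-- early-terminating recursion: collect at most k targets
def pvGo (func_mode : Bool) : List String → Nat → List String
  | _, 0 => []
  | [], _ => []
  | w :: ws, Nat.succ k =>
    match pvClassify w func_mode with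
    | none => pvGo func_mode ws (Nat.succ k)
    | some t => t :: pvGo func_mode ws k

def extract_code_targets_py_alt (query : String) : List String :=
  let func_mode := PySem.Str.isIn "function" (PySem.Str.lower query)
  pvGo func_mode (PySem.Str.split₀ query) 3

-- ===== PRECONDITION & SPEC =====
def Spec_extract_code_targets_py (query : String) (out : List String) : Prop := out = extract_code_targets_py_alt query
instance (query : String) (out : List String) : Decidable (Spec_extract_code_targets_py query out) := by unfold Spec_extract_code_targets_py; infer_instance

-- ===== CLAIM (what is proved, stated in full; the proofs are below) =====
def Claim_equal_extract_code_targets_py : Prop := ∀ (query : String), Dom_extract_code_targets_py query → Spec_extract_code_targets_py query (extract_code_targets_py query)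

-- ===== LEMMAS AND PROOFS =====

-- A's loop body appends exactly what pvClassify returns
lemma stepA_eq_classify (fm : Bool) (acc : List String) (w : String) :
    (let clean_word := PySem.Str.stripChars w ".,!?()[]{}\":;"
     if PySem.Str.endswith clean_word "()" || fm then
       acc ++ [PySem.Str.replace clean_word "()" ""]
     else if PySem.Str.isIn "." clean_word &&
         ([".py", ".js", ".ts", ".java"].any (fun ext => PySem.Str.isIn ext clean_word)) then
       acc ++ [clean_word]
     else if decide (3 < PySem.Str.len clean_word) &&
         (PySem.Str.isIn "_" clean_word ||
           (PySem.Str.slice clean_word (some 1) none).toList.any PySem.Chars.isupper) then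
       acc ++ [clean_word]
     else acc) =
    (match pvClassify w fm with
     | some t => acc ++ [t]
     | none => acc) := by
  simp only [pvClassify, Bool.or_comm fm]
  split_ifs <;> rfl

-- A's fold accumulates the filterMap of pvClassify
lemma foldA_eq_filterMap (fm : Bool) (ws : List String) (acc : List String) :
    ws.foldl (fun acc w =>
      let clean_word := PySem.Str.stripChars w ".,!?()[]{}\":;"
      if PySem.Str.endswith clean_word "()" || fm then
        acc ++ [PySem.Str.replace clean_word "()" ""]
      else if PySem.Str.isIn "." clean_word &&
          ([".py", ".js", ".ts", ".java"].any (fun ext => PySem.Str.isIn ext clean_word)) then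
        acc ++ [clean_word]
      else if decide (3 < PySem.Str.len clean_word) &&
          (PySem.Str.isIn "_" clean_word ||
            (PySem.Str.slice clean_word (some 1) none).toList.any PySem.Chars.isupper) then
        acc ++ [clean_word]
      else acc) acc = acc ++ ws.filterMap (fun w => pvClassify w fm) := by
  induction ws generalizing acc with
  | nil => simp
  | cons w ws ih =>
    rw [List.foldl_cons, stepA_eq_classify fm acc w, List.filterMap_cons]
    cases h : pvClassify w fm with
    | none => simp only [h]; exact ih acc
    | some t => simp only [h]; rw [ih]; simp

-- B's early-terminating recursion computes take k of the same filterMap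
lemma pvGo_eq_take (fm : Bool) (ws : List String) (k : Nat) :
    pvGo fm ws k = (ws.filterMap (fun w => pvClassify w fm)).take k := by
  induction ws generalizing k with
  | nil => cases k <;> simp [pvGo]
  | cons w ws ih =>
    cases k with
    | zero => simp [pvGo]
    | succ k =>
      rw [List.filterMap_cons]
      cases h : pvClassify w fm <;> simp [pvGo, h, ih]

-- ===== VERDICT (by name: the statement is the Claim_ definition above) =====
theorem extract_code_targets_py_spec : Claim_equal_extract_code_targets_py := by
  intro query _
  unfold Spec_extract_code_targets_py extract_code_targets_py extract_code_targets_py_alt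
  simp only [foldA_eq_filterMap, pvGo_eq_take, List.nil_append]
  simpa using PySem.List.slice_to_natCast _ 3
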